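-- pv_equiv track=rewrite | github.com/tonii43/Undip-Praktikum | Pertemuan 7 (List)/HackerRank/2's_Complement.py | Balikin
-- ===== SOURCE A (Python) =====
-- def Konsi(y,x):
--     return y + [x]
--
-- def Head(x):
--     if x != []:
--         return x[:-1]
--
-- def IsEmpty(x):
--     if x == []:
--         return True
--     else:
--         return False
--
-- def LastElmt(x):
--     if x != []:
--         return x[-1]
--
-- def Balikin(B):
--     if IsEmpty(B):
--         return []
--     else:
--         if LastElmt(B) == 0:
--             return Konsi(Balikin(Head(B)), 1)
--         else:
--             return Konsi(Balikin(Head(B)), 0)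
-- ===== SOURCE B (Python) =====
-- def Balikin(B):
--     return [1 if b == 0 else 0 for b in B]
-- ===== Notes on version B (the rewrite author's own statement) =====
-- stated objective: faster
-- what changed: Replaces the back-to-front recursion with helper functions (Head/LastElmt/Konsi slicing copies) by a single forward comprehension mapping each element with 'b == 0'.
import Mathlib
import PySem

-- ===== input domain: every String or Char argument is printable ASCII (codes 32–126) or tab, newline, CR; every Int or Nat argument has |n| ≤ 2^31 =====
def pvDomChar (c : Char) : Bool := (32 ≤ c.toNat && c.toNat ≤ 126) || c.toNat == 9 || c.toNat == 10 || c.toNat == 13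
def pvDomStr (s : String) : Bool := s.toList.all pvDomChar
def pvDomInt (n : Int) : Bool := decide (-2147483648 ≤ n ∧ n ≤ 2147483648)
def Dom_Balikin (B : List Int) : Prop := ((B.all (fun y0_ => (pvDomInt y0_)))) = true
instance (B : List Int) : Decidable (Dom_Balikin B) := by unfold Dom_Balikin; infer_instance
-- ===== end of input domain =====

-- B replaces A's back-to-front recursion (with Head/LastElmt slicing helpers) by one forward comprehension; objective: simpler.

-- ===== PORT A =====
def Konsi (y : List Int) (x : Int) : List Int := y ++ [x]

def HeadA (x : List Int) : Option (List Int) :=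
  if x ≠ [] then some (PySem.List.slice x none (some (-1))) else none  -- x[:-1]

def IsEmptyA (x : List Int) : Bool := if x == [] then true else false

def LastElmtA (x : List Int) : Option Int :=
  if x ≠ [] then PySem.List.pyGet? x (-1) else none  -- x[-1]

def Balikin (B : List Int) : List Int :=
  if IsEmptyA B then []
  else if LastElmtA B = some 0 then Konsi (Balikin ((HeadA B).getD [])) 1
  else Konsi (Balikin ((HeadA B).getD [])) 0
termination_by B.length
decreasing_by
  all_goals
    simp only [IsEmptyA, beq_iff_eq] at *
    cases B with
    | nil => simp_all
    | cons a t =>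
      simp [HeadA, PySem.List.slice_to_neg_one]

-- ===== PORT B =====
def Balikin_alt (B : List Int) : List Int :=
  B.map (fun b => if b == 0 then 1 else 0)

-- ===== PRECONDITION & SPEC =====
def Spec_Balikin (B : List Int) (out : List Int) : Prop := out = Balikin_alt B
instance (B : List Int) (out : List Int) : Decidable (Spec_Balikin B out) := by unfold Spec_Balikin; infer_instance

-- ===== CLAIM (what is proved, stated in full; the proofs are below) =====
def Claim_equal_Balikin : Prop := ∀ (B : List Int), Dom_Balikin B → Spec_Balikin B (Balikin B)

-- ===== LEMMAS AND PROOFS =====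
theorem Balikin_concat (xs : List Int) (x : Int) :
    Balikin (xs ++ [x]) = Balikin xs ++ [if x == 0 then 1 else 0] := by
  rw [Balikin]
  have hne : xs ++ [x] ≠ [] := by simp
  have hlast : LastElmtA (xs ++ [x]) = some x := by
    simp [LastElmtA, hne, PySem.List.pyGet?_neg_one_append_singleton]
  have hhead : HeadA (xs ++ [x]) = some xs := by
    simp [HeadA, hne, PySem.List.slice_to_neg_one]
  simp [IsEmptyA, hne, hlast, hhead, Konsi]
  by_cases hx : x = 0 <;> simp [hx]

theorem Balikin_eq_alt (B : List Int) : Balikin B = Balikin_alt B := by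
  induction B using List.reverseRecOn with
  | nil => rw [Balikin]; rfl
  | append_singleton xs x ih =>
    rw [Balikin_concat, ih]
    simp [Balikin_alt]

-- ===== VERDICT (by name: the statement is the Claim_ definition above) =====
theorem Balikin_spec : Claim_equal_Balikin := by
  intro B _
  unfold Spec_Balikin
  exact Balikin_eq_alt B
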